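-- pv_equiv track=rewrite | github.com/Vinanddrinks/prjtpython | analytics/new_melody.py | insert_silences
-- ===== SOURCE A (Python) =====
-- def insert_silences(new_song, partition):
--     # since it is not said on the project folder we decided we would keep all the silences at their positions to keep
--     # the same rythm for our new song therefore this program adds the silences to the new partition at their respective
--     # places
--     silences_position = []
--     final_song = []
--     split_part = partition.split(" ")
--     for idx, val in enumerate(split_part):
--         # This loop checks where are the silences position in the main partition and get a tuple with its position and
--         # value
--         if val == "p" or val[:1] == "Z":
--             silences_position.append((idx, val))
--     for i in range(len(split_part)):
--         # This loop compares both lists and adds silences at their respective positions while creating the final song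
--         # with the new_song variable gotten from the markov_partition() function
--         if silences_position and silences_position[0][0] == i:
--             silence = silences_position.pop(0)
--             final_song.append(silence[1])
--             # adds silence
--         elif new_song:
--             note = new_song.pop(0)
--             final_song.append(note)
--             # adds note
--     return final_song
-- ===== SOURCE B (Python) =====
-- def insert_silences(new_song, partition):
--     # Single pass: a silence token stays where it is, any other slot takes
--     # the next note from new_song (consumed in place, as the original does).
--     final_song = []
--     for val in partition.split(" "):
--         if val == "p" or val[:1] == "Z":
--             final_song.append(val)
--         elif new_song:
--             final_song.append(new_song.pop(0))
--     return final_song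
-- ===== Notes on version B (the rewrite author's own statement) =====
-- stated objective: simpler
-- what changed: Replaces A's two-phase scheme (build an indexed list of silence positions, then replay range(len) matching indices against that list) with one direct pass over the tokens that appends a silence or pops the next note.
import Mathlib
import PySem

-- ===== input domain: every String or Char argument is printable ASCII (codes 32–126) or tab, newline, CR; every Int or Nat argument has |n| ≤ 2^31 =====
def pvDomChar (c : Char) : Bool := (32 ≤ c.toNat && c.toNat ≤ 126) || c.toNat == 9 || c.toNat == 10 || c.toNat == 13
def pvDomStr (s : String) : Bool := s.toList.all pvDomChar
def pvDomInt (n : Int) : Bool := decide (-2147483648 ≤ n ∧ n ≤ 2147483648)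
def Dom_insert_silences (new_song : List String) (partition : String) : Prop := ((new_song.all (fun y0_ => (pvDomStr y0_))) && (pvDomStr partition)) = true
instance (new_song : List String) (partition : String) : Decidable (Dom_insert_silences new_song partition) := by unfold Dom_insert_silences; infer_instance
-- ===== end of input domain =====

-- B is a simpler one-pass rewrite of A; both mutate new_song in Python (pop(0)) identically,
-- the equivalence proved here is about the return value.

-- ===== PORT A =====
-- val == "p" or val[:1] == "Z"  (shared silence predicate, identical in both sources)
def pvIsSil (val : String) : Bool :=
  val == "p" || PySem.Str.slice val none (some 1) == "Z"

-- first loop: for idx, val in enumerate(split_part): if silence, append (idx, val)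
def pvSilLoop (idx : Nat) (toks : List String) (acc : List (Nat × String)) :
    List (Nat × String) :=
  match toks with
  | [] => acc
  | v :: vs => pvSilLoop (idx + 1) vs (if pvIsSil v then acc ++ [(idx, v)] else acc)

-- second loop: for i in range(len(split_part)): pop a silence at its index, else pop a note
def pvLoopA (idxs : List Nat) (sils : List (Nat × String)) (ns fs : List String) :
    List String :=
  match idxs with
  | [] => fs
  | i :: is' =>
    match sils with
    | (j, v) :: rest =>
      if j = i then pvLoopA is' rest ns (fs ++ [v])
      else match ns with
        | n :: ns' => pvLoopA is' sils ns' (fs ++ [n])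
        | [] => pvLoopA is' sils ns fs
    | [] =>
      match ns with
      | n :: ns' => pvLoopA is' [] ns' (fs ++ [n])
      | [] => pvLoopA is' [] ns fs

def insert_silences (new_song : List String) (partition : String) : List String :=
  let split_part := (PySem.Str.split? partition " ").getD []
  let silences_position := pvSilLoop 0 split_part []
  pvLoopA (List.range split_part.length) silences_position new_song []

-- ===== PORT B =====
-- one pass over the tokens: keep a silence in place, else consume the next note
def pvLoopB (toks ns fs : List String) : List String :=
  match toks with
  | [] => fs
  | v :: vs =>
    if pvIsSil v then pvLoopB vs ns (fs ++ [v])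
    else match ns with
      | n :: ns' => pvLoopB vs ns' (fs ++ [n])
      | [] => pvLoopB vs [] fs

def insert_silences_alt (new_song : List String) (partition : String) : List String :=
  pvLoopB ((PySem.Str.split? partition " ").getD []) new_song []

-- ===== PRECONDITION & SPEC =====
def Spec_insert_silences (new_song : List String) (partition : String) (out : List String) : Prop := out = insert_silences_alt new_song partition
instance (new_song : List String) (partition : String) (out : List String) : Decidable (Spec_insert_silences new_song partition out) := by unfold Spec_insert_silences; infer_instance

-- ===== CLAIM (what is proved, stated in full; the proofs are below) =====
def Claim_equal_insert_silences : Prop := ∀ (new_song : List String) (partition : String), Dom_insert_silences new_song partition → Spec_insert_silences new_song partition (insert_silences new_song partition)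

-- ===== LEMMAS AND PROOFS =====

-- canonical form of A's first loop: silences of toks, indexed from k
def pvSilsFrom (k : Nat) (toks : List String) : List (Nat × String) :=
  match toks with
  | [] => []
  | v :: vs =>
    if pvIsSil v then (k, v) :: pvSilsFrom (k + 1) vs else pvSilsFrom (k + 1) vs

theorem pvSilLoop_eq (toks : List String) :
    ∀ (k : Nat) (acc : List (Nat × String)),
      pvSilLoop k toks acc = acc ++ pvSilsFrom k toks := by
  induction toks with
  | nil => intro k acc; simp [pvSilLoop, pvSilsFrom]
  | cons v vs ih =>
    intro k acc
    by_cases h : pvIsSil v = true <;>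
      simp [pvSilLoop, pvSilsFrom, h, ih]

theorem pvSilsFrom_ge (toks : List String) :
    ∀ (k : Nat) (p : Nat × String), p ∈ pvSilsFrom k toks → k ≤ p.1 := by
  induction toks with
  | nil => intro k p h; simp [pvSilsFrom] at h
  | cons v vs ih =>
    intro k p h
    by_cases hs : pvIsSil v = true <;> simp [pvSilsFrom, hs] at h
    · rcases h with h | h
      · simp [h]
      · exact Nat.le_of_succ_le (ih (k + 1) p h)
    · exact Nat.le_of_succ_le (ih (k + 1) p h)

theorem pvLoopA_eq_pvLoopB (toks : List String) :
    ∀ (k : Nat) (ns fs : List String),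
      pvLoopA (List.range' k toks.length) (pvSilsFrom k toks) ns fs =
        pvLoopB toks ns fs := by
  induction toks with
  | nil => intro k ns fs; simp [pvLoopA, pvLoopB, pvSilsFrom]
  | cons v vs ih =>
    intro k ns fs
    rw [show (v :: vs).length = vs.length + 1 from rfl, List.range'_succ]
    by_cases hs : pvIsSil v = true
    · simp [pvSilsFrom, hs, pvLoopA, pvLoopB, ih]
    · simp only [pvSilsFrom, hs, pvLoopB]
      cases hrest : pvSilsFrom (k + 1) vs with
      | nil =>
        cases ns with
        | nil => simpa [pvLoopA, hs] using (hrest ▸ ih (k + 1) [] fs)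
        | cons n ns' => simpa [pvLoopA, hs] using (hrest ▸ ih (k + 1) ns' (fs ++ [n]))
      | cons p rest =>
        have hk : ¬ p.1 = k := by
          have := pvSilsFrom_ge vs (k + 1) p (by simp [hrest])
          omega
        cases ns with
        | nil => simpa [pvLoopA, hs, hk] using (hrest ▸ ih (k + 1) [] fs)
        | cons n ns' => simpa [pvLoopA, hs, hk] using (hrest ▸ ih (k + 1) ns' (fs ++ [n]))

-- ===== VERDICT (by name: the statement is the Claim_ definition above) =====
theorem insert_silences_spec : Claim_equal_insert_silences := by
  intro new_song partition _
  unfold Spec_insert_silences insert_silences insert_silences_alt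
  simp only []
  rw [pvSilLoop_eq, List.nil_append, List.range_eq_range']
  exact pvLoopA_eq_pvLoopB _ 0 new_song []
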